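-- pv_equiv track=rewrite | github.com/nauco/Problem_Solving | 프로그래머스/이분탐색/예산.py | solution
-- ===== SOURCE A (Python) =====
-- def solution(budgets, M):
--     answer = 0
--     if(sum(budgets) <= M):
--         return max(budgets)
--
--     left = M // len(budgets)
--     right = max(budgets)
--     while(left < right):
--         answer = (left + right) // 2
--         use = 0
--         for i in budgets:
--             use += min(i, answer)
--
--         if(use > M):
--             right = answer
--         elif(use < M):
--             left = answer
--             if(left +1 == right):
--                 return answer
--         else:
--             return answer
-- ===== SOURCE B (Python) =====
-- def solution(budgets, M):
--     if sum(budgets) <= M: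
--         return max(budgets)
--     s = sorted(budgets)
--     prefix = 0
--     rem = len(s)
--     for b in s:
--         if prefix + rem * b > M:
--             return (M - prefix) // rem
--         prefix += b
--         rem -= 1
-- ===== Notes on version B (the rewrite author's own statement) =====
-- stated objective: alternative
-- what changed: Replaces A's binary search on the cap value (each probe re-scanning all budgets) by a single sort + running-prefix scan that finds the cap segment and computes the answer with one closed-form floor division.
import Mathlib
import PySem

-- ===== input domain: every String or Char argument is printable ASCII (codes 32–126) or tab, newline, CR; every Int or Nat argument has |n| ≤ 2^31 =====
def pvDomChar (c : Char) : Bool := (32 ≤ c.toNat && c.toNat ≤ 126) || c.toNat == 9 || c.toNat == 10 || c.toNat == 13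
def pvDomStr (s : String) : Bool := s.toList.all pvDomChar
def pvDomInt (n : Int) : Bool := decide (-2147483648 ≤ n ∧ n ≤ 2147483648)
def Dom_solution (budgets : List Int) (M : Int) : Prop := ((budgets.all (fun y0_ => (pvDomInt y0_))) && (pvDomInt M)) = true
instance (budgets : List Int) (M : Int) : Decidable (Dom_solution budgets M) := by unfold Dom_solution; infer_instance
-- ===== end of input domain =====

-- B replaces A's binary search over the cap by a sort + prefix scan with a closed-form division; equal on nonempty budgets.

-- ===== PORT A =====
-- the while-loop of A; terminates because the bracket [left, right) shrinks
def solutionLoop (budgets : List Int) (M left right : Int) : Int :=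
  if h : left < right then
    let answer := PySem.Int.floordiv (left + right) 2
    let use := budgets.foldl (fun u i => u + min i answer) 0
    if use > M then
      solutionLoop budgets M left answer
    else if use < M then
      if answer + 1 = right then answer
      else solutionLoop budgets M answer right
    else answer
  else 0  -- Python falls off the while loop returning None (outside the Int type; unreachable under Pre_)
  termination_by (right - left).toNat
  decreasing_by
    · have h2 : PySem.Int.floordiv (left + right) 2 < right := by
        rw [PySem.Int.floordiv_lt_iff_lt_mul (by omega : (0:Int) < 2)]; omega
      have h1 := (PySem.Int.floordiv_two_mid_bounds (le_of_lt h)).1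
      omega
    · have h2 : PySem.Int.floordiv (left + right) 2 < right := by
        rw [PySem.Int.floordiv_lt_iff_lt_mul (by omega : (0:Int) < 2)]; omega
      have h1 := (PySem.Int.floordiv_two_mid_bounds (le_of_lt h)).1
      -- answer ≠ left, otherwise right = left + 1 and the loop would have returned
      rcases eq_or_lt_of_le h1 with he | hlt
      · exfalso
        have : PySem.Int.floordiv (left + right) 2 < left + 1 := by omega
        rw [PySem.Int.floordiv_lt_iff_lt_mul (by omega : (0:Int) < 2)] at this
        omega
      · omega

def solution (budgets : List Int) (M : Int) : Int :=
  if budgets.sum ≤ M then (PySem.List.max? budgets (fun x => x)).getD 0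
  else solutionLoop budgets M (PySem.Int.floordiv M budgets.length)
        ((PySem.List.max? budgets (fun x => x)).getD 0)

-- ===== PORT B =====
-- the for-loop of Source B: walk the sorted budgets with a running prefix sum
def altLoop (M : Int) : List Int → Int → Int → Int
  | [], _pre, _rem => 0  -- unreachable in Source B (sum > M); Python would fall off returning None
  | b :: t, pre, rem =>
    if pre + rem * b > M then PySem.Int.floordiv (M - pre) rem
    else altLoop M t (pre + b) (rem - 1)

def solution_alt (budgets : List Int) (M : Int) : Int :=
  if budgets.sum ≤ M then (PySem.List.max? budgets (fun x => x)).getD 0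
  else
    let s := PySem.List.sorted budgets (fun x => x) false
    altLoop M s 0 s.length

-- ===== PRECONDITION & SPEC =====
-- Pre_ excludes only the empty list, on which A always raises (ValueError from max([]) when M ≥ 0, ZeroDivisionError when M < 0)
def Pre_solution (budgets : List Int) (M : Int) : Prop := budgets ≠ []
instance (budgets : List Int) (M : Int) : Decidable (Pre_solution budgets M) := by unfold Pre_solution; infer_instance
def pvWitness_solution : List Int × Int := ([1, 2, 3], 2)

def Spec_solution (budgets : List Int) (M : Int) (out : Int) : Prop := out = solution_alt budgets M
instance (budgets : List Int) (M : Int) (out : Int) : Decidable (Spec_solution budgets M out) := by unfold Spec_solution; infer_instance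

-- ===== CLAIM (what is proved, stated in full; the proofs are below) =====
def Claim_equal_solution : Prop := ∀ (budgets : List Int) (M : Int), Dom_solution budgets M → Pre_solution budgets M → Spec_solution budgets M (solution budgets M)

-- ===== LEMMAS AND PROOFS =====

-- capped sum: sum of min(b, c) over the list
def Smin (c : Int) (l : List Int) : Int := (l.map (fun b => min b c)).sum

theorem Smin_cons (c b : Int) (t : List Int) : Smin c (b :: t) = min b c + Smin c t := by
  simp [Smin]

theorem foldl_use (l : List Int) (c a : Int) :
    l.foldl (fun u i => u + min i c) a = a + Smin c l := by
  induction l generalizing a with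
  | nil => simp [Smin]
  | cons b t ih => rw [List.foldl_cons, ih, Smin_cons]; ring

theorem Smin_mono {c d : Int} (h : c ≤ d) (l : List Int) : Smin c l ≤ Smin d l := by
  induction l with
  | nil => simp [Smin]
  | cons b t ih =>
    rw [Smin_cons, Smin_cons]
    have : min b c ≤ min b d := min_le_min le_rfl h
    omega

theorem Smin_strict (c : Int) (l : List Int) (h : Smin c l < l.sum) :
    Smin c l + 1 ≤ Smin (c + 1) l := by
  induction l with
  | nil => simp [Smin] at h
  | cons b t ih =>
    rw [Smin_cons] at h ⊢
    rw [Smin_cons, List.sum_cons] at *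
    by_cases hb : b ≤ c
    · have h1 : min b c = b := min_eq_left hb
      have h2 : min b (c + 1) = b := min_eq_left (by omega)
      have ht : Smin c t < t.sum := by omega
      have := ih ht
      omega
    · have h1 : min b c = c := min_eq_right (by omega)
      have h2 : min b (c + 1) = c + 1 := min_eq_right (by omega)
      have := Smin_mono (by omega : c ≤ c + 1) t
      omega

theorem Smin_const_of_le {L : Int} (l : List Int) (h : ∀ b ∈ l, L ≤ b) :
    Smin L l = l.length * L := by
  induction l with
  | nil => simp [Smin]
  | cons b t ih =>
    rw [Smin_cons, ih (fun x hx => h x (List.mem_cons_of_mem _ hx))]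
    have : min b L = L := min_eq_right (h b (List.mem_cons_self))
    rw [this]; simp only [List.length_cons]; push_cast; ring

theorem Smin_le_len_mul (c : Int) (l : List Int) : Smin c l ≤ l.length * c := by
  induction l with
  | nil => simp [Smin]
  | cons b t ih =>
    rw [Smin_cons]
    have : min b c ≤ c := min_le_right _ _
    simp only [List.length_cons]
    push_cast
    push_cast at ih
    nlinarith

theorem Smin_eq_sum_of_le {c : Int} (l : List Int) (h : ∀ b ∈ l, b ≤ c) :
    Smin c l = l.sum := by
  induction l with
  | nil => simp [Smin]
  | cons b t ih =>
    rw [Smin_cons, List.sum_cons, ih (fun x hx => h x (List.mem_cons_of_mem _ hx))]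
    have : min b c = b := min_eq_left (h b (List.mem_cons_self))
    omega

theorem sum_le_len_mul {mx : Int} (l : List Int) (h : ∀ b ∈ l, b ≤ mx) :
    l.sum ≤ l.length * mx := by
  induction l with
  | nil => simp
  | cons b t ih =>
    rw [List.sum_cons]
    have hb := h b (List.mem_cons_self)
    have := ih (fun x hx => h x (List.mem_cons_of_mem _ hx))
    simp only [List.length_cons]
    push_cast
    push_cast at this
    nlinarith

theorem Smin_perm {l l' : List Int} (h : l.Perm l') (c : Int) : Smin c l = Smin c l' :=
  List.Perm.sum_eq (List.Perm.map _ h)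

-- the loop of A returns the unique c with Smin c ≤ M < Smin (c+1)
theorem loopSpec (budgets : List Int) (M : Int) (hsum : M < budgets.sum) :
    ∀ (n : Nat) (left right : Int), (right - left).toNat ≤ n →
      Smin left budgets ≤ M → M < Smin right budgets → left < right →
      Smin (solutionLoop budgets M left right) budgets ≤ M ∧
        M < Smin (solutionLoop budgets M left right + 1) budgets := by
  intro n
  induction n with
  | zero => intro left right hn _ _ hlr; omega
  | succ n ih =>
    intro left right hn hL hR hlr
    rw [solutionLoop]
    simp only [hlr, dite_true]
    set answer := PySem.Int.floordiv (left + right) 2 with hans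
    have hameq : budgets.foldl (fun u i => u + min i answer) 0 = Smin answer budgets := by
      rw [foldl_use]; ring
    have h1 : left ≤ answer := (PySem.Int.floordiv_two_mid_bounds (le_of_lt hlr)).1
    have h2 : answer < right := by
      rw [hans, PySem.Int.floordiv_lt_iff_lt_mul (by omega : (0:Int) < 2)]; omega
    rw [hameq]
    by_cases hgt : Smin answer budgets > M
    · simp only [hgt, if_true]
      have hlta : left < answer := by
        rcases eq_or_lt_of_le h1 with he | hlt
        · exfalso; rw [← he] at hgt; omega
        · exact hlt
      exact ih left answer (by omega) hL hgt hlta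
    · simp only [hgt, if_false]
      by_cases hlt2 : Smin answer budgets < M
      · simp only [hlt2, if_true]
        by_cases hnext : answer + 1 = right
        · simp only [hnext, if_true]
          refine ⟨by omega, ?_⟩
          exact hR
        · simp only [hnext, if_false]
          have hlta : left < answer := by
            rcases eq_or_lt_of_le h1 with he | hlt
            · exfalso
              have hx : answer < left + 1 := by omega
              rw [hans, PySem.Int.floordiv_lt_iff_lt_mul (by omega : (0:Int) < 2)] at hx
              have : right ≤ left + 1 := by omega
              have : right = left + 1 := by omega
              exact hnext (by omega)
            · exact hlt
          exact ih answer right (by omega) (by omega) hR h2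
      · simp only [hlt2, if_false]
        have heq : Smin answer budgets = M := by omega
        refine ⟨by omega, ?_⟩
        have := Smin_strict answer budgets (by omega)
        omega

-- the loop of Source B: given a sorted tail, its prefix sum and a lower bound L on the tail,
-- it returns c with L ≤ c and pre + Smin c t ≤ M < pre + Smin (c+1) t
theorem altLoopSpec (M : Int) :
    ∀ (t : List Int) (pre L : Int), t.Pairwise (· ≤ ·) → (∀ b ∈ t, L ≤ b) →
      M < pre + t.sum → pre + (t.length : Int) * L ≤ M →
      L ≤ altLoop M t pre t.length ∧
        pre + Smin (altLoop M t pre t.length) t ≤ M ∧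
        M < pre + Smin (altLoop M t pre t.length + 1) t := by
  intro t
  induction t with
  | nil => intro pre L _ _ h1 h2; simp at h1 h2; omega
  | cons b t ih =>
    intro pre L hpw hLB hsum hlow
    have hrem : ((b :: t).length : Int) = (t.length : Int) + 1 := by simp only [List.length_cons]; push_cast; ring
    have hremPos : (0 : Int) < ((b :: t).length : Int) := by simp only [List.length_cons]; push_cast; omega
    rw [altLoop]
    by_cases hgt : pre + ((b :: t).length : Int) * b > M
    · simp only [hgt, if_true]
      set rem := ((b :: t).length : Int) with hremdef
      set c := PySem.Int.floordiv (M - pre) rem with hc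
      have hcu : rem * c ≤ M - pre := by
        have : c ≤ c ↔ c * rem ≤ M - pre := PySem.Int.le_floordiv_iff_mul_le hremPos
        have h := this.mp le_rfl
        nlinarith [h]
      have hcu2 : M - pre < (c + 1) * rem := by
        have : c < c + 1 ↔ M - pre < (c + 1) * rem := PySem.Int.floordiv_lt_iff_lt_mul hremPos
        exact this.mp (by omega)
      have hLc : L ≤ c := by
        rw [hc, PySem.Int.le_floordiv_iff_mul_le hremPos]
        have hall : ∀ x ∈ b :: t, L ≤ x := hLB
        nlinarith [hlow]
      have hcb : c + 1 ≤ b := by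
        have : c < b := by
          rw [hc, PySem.Int.floordiv_lt_iff_lt_mul hremPos]
          nlinarith [hgt]
        omega
      have hble : ∀ x ∈ b :: t, b ≤ x := by
        intro x hx
        rcases List.mem_cons.mp hx with rfl | hx'
        · exact le_rfl
        · exact (List.pairwise_cons.mp hpw).1 x hx'
      have hSc : Smin c (b :: t) = ((b :: t).length : Int) * c :=
        Smin_const_of_le _ (fun x hx => le_trans (by omega) (hble x hx))
      have hSc1 : Smin (c + 1) (b :: t) = ((b :: t).length : Int) * (c + 1) :=
        Smin_const_of_le _ (fun x hx => le_trans hcb (hble x hx))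
      refine ⟨hLc, ?_, ?_⟩
      · rw [hSc]; rw [← hremdef]; nlinarith [hcu]
      · rw [hSc1]; rw [← hremdef]; nlinarith [hcu2]
    · simp only [hgt, if_false]
      have hlen : ((b :: t).length : Int) - 1 = (t.length : Int) := by simp only [List.length_cons]; push_cast; ring
      rw [hlen]
      have hpw' := (List.pairwise_cons.mp hpw).2
      have hblet : ∀ x ∈ t, b ≤ x := (List.pairwise_cons.mp hpw).1
      have hsum' : M < (pre + b) + t.sum := by
        rw [List.sum_cons] at hsum; omega
      have hlow' : (pre + b) + (t.length : Int) * b ≤ M := by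
        simp only [List.length_cons] at hgt
        push_cast at hgt ⊢
        nlinarith [hgt]
      obtain ⟨hbc, hc1, hc2⟩ := ih (pre + b) b hpw' hblet hsum' hlow'
      set c := altLoop M t (pre + b) (t.length : Int)
      have hminb : min b c = b := min_eq_left hbc
      have hminb1 : min b (c + 1) = b := min_eq_left (by omega)
      refine ⟨le_trans (hLB b List.mem_cons_self) hbc, ?_, ?_⟩
      · rw [Smin_cons, hminb]; omega
      · rw [Smin_cons, hminb1]; omega

-- uniqueness of the crossing point
theorem crossing_unique {budgets : List Int} {M c1 c2 : Int}
    (h1 : Smin c1 budgets ≤ M) (h1' : M < Smin (c1 + 1) budgets)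
    (h2 : Smin c2 budgets ≤ M) (h2' : M < Smin (c2 + 1) budgets) : c1 = c2 := by
  by_contra hne
  rcases lt_or_gt_of_ne hne with h | h
  · have := Smin_mono (by omega : c1 + 1 ≤ c2) budgets; omega
  · have := Smin_mono (by omega : c2 + 1 ≤ c1) budgets; omega

-- ===== VERDICT (by name: the statement is the Claim_ definition above) =====
theorem solution_spec : Claim_equal_solution := by
  intro budgets M _ hpre
  unfold Spec_solution solution solution_alt
  by_cases hs : budgets.sum ≤ M
  · simp only [hs, if_true]
  · simp only [hs, if_false]
    have hsum : M < budgets.sum := by omega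
    obtain ⟨b0, rest, hb0⟩ := List.exists_cons_of_ne_nil hpre
    -- max budgets
    obtain ⟨mx, hmx⟩ : ∃ mx, PySem.List.max? budgets (fun x => x) = some mx := by
      cases hq : PySem.List.max? budgets (fun x => x) with
      | none => exact absurd ((PySem.List.max?_eq_none_iff _ _).mp hq) hpre
      | some m => exact ⟨m, rfl⟩
    have hmxmem : mx ∈ budgets := PySem.List.max?_mem hmx
    have hmxmax : ∀ y ∈ budgets, y ≤ mx := by
      intro y hy; exact PySem.List.max?_isMax hmx y hy
    have hlenpos : (0 : Int) < (budgets.length : Int) := by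
      rw [hb0]; simp only [List.length_cons]; push_cast; omega
    -- A side
    have hSleft : Smin (PySem.Int.floordiv M budgets.length) budgets ≤ M := by
      have h1 := Smin_le_len_mul (PySem.Int.floordiv M budgets.length) budgets
      have h2 : PySem.Int.floordiv M budgets.length ≤ PySem.Int.floordiv M budgets.length := le_rfl
      rw [PySem.Int.le_floordiv_iff_mul_le hlenpos] at h2
      nlinarith [h1, h2]
    have hSright : M < Smin mx budgets := by
      rw [Smin_eq_sum_of_le budgets hmxmax]; exact hsum
    have hlr : PySem.Int.floordiv M budgets.length < mx := by
      rw [PySem.Int.floordiv_lt_iff_lt_mul hlenpos]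
      have := sum_le_len_mul budgets hmxmax
      nlinarith [this]
    have hA := loopSpec budgets M hsum
      ((mx - PySem.Int.floordiv M budgets.length).toNat)
      (PySem.Int.floordiv M budgets.length) mx le_rfl hSleft hSright hlr
    -- B side
    set s := PySem.List.sorted budgets (fun x => x) false with hsdef
    have hperm : s.Perm budgets := PySem.List.sorted_perm _ _ _
    have hpw : s.Pairwise (· ≤ ·) := by
      have := PySem.List.sorted_pairwise (xs := budgets) (key := fun x => x)
      simpa using this
    obtain ⟨h0, hrest, hh⟩ : ∃ h0 hrest, s = h0 :: hrest := by
      cases hq : s with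
      | nil =>
        exfalso
        have : budgets = [] := by
          have := hperm.length_eq; rw [hq] at this; simpa using (List.length_eq_zero_iff.mp this.symm)
        exact hpre this
      | cons a l => exact ⟨a, l, rfl⟩
    have hhead : ∀ y ∈ budgets, h0 ≤ y := by
      intro y hy
      have := PySem.List.key_head_sorted_le (xs := budgets) (key := fun x => x) (hsdef ▸ hh) y hy
      simpa using this
    set L := min (PySem.Int.floordiv M budgets.length) h0 with hLdef
    have hLall : ∀ b ∈ s, L ≤ b := by
      intro b hb
      have : b ∈ budgets := hperm.mem_iff.mp hb
      exact le_trans (min_le_right _ _) (hhead b this)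
    have hlens : (s.length : Int) = (budgets.length : Int) := by
      exact_mod_cast hperm.length_eq
    have hLlow : (0 : Int) + (s.length : Int) * L ≤ M := by
      have h2 : (PySem.Int.floordiv M budgets.length) * (budgets.length : Int) ≤ M := by
        have := (PySem.Int.le_floordiv_iff_mul_le (a := M) hlenpos).mp le_rfl
        exact this
      have hLle : L ≤ PySem.Int.floordiv M budgets.length := min_le_left _ _
      rw [hlens]
      nlinarith [h2, hLle, hlenpos]
    have hsums : M < (0 : Int) + s.sum := by
      rw [hperm.sum_eq]; omega
    have hB := altLoopSpec M s 0 L hpw hLall hsums hLlow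
    obtain ⟨_, hB1, hB2⟩ := hB
    obtain ⟨hA1, hA2⟩ := hA
    rw [Smin_perm hperm.symm] at hA1 hA2
    rw [hmx]
    simp only [Option.getD_some]
    exact crossing_unique (hA1) (hA2) (by omega : Smin (altLoop M s 0 s.length) s ≤ M) (by omega)
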